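-- pv_equiv track=rewrite | github.com/carlosbelop/Multiagentes_Shape_Formation | ShapeBugs.py | squared_square
-- ===== SOURCE A (Python) =====
-- def squared_square(x, y):
--     # Coordenadas del cuadrado grande
--     large_square_x_min, large_square_x_max = 100, 700
--     large_square_y_min, large_square_y_max = 100, 700
--
--     # Verificar si el punto está dentro del cuadrado grande
--     if not (large_square_x_min <= x <= large_square_x_max and large_square_y_min <= y <= large_square_y_max):
--         return False
--
--     # Coordenadas de los 9 cuadrados pequeños (simétricamente distribuidos)
--     small_square_size = 100
--     small_square_gap = 100
--     small_squares = [
--         (x_center, y_center)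
--         for x_center in range(200, 601, small_square_gap + small_square_size)
--         for y_center in range(200, 601, small_square_gap + small_square_size)
--     ]
--
--     # Verificar si el punto está en alguno de los cuadrados pequeños
--     for x_center, y_center in small_squares:
--         if x_center - small_square_size // 2 <= x <= x_center + small_square_size // 2 and \
--            y_center - small_square_size // 2 <= y <= y_center + small_square_size // 2:
--             return False  # El punto está dentro de uno de los cuadrados pequeños
--
--     # Si el punto está dentro del cuadrado grande pero fuera de los pequeños, devuelve True
--     return True
-- ===== SOURCE B (Python) =====
-- def squared_square(x, y):
--     # Product decomposition: the 9 hole squares are the Cartesian product of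
--     # three identical coordinate bands [150,250], [350,450], [550,650].
--     if not (100 <= x <= 700 and 100 <= y <= 700):
--         return False
--
--     def in_band(v):
--         return 150 <= v <= 250 or 350 <= v <= 450 or 550 <= v <= 650
--
--     return not (in_band(x) and in_band(y))
-- ===== Notes on version B (the rewrite author's own statement) =====
-- stated objective: simpler
-- what changed: Replaces the enumeration of 9 small-square centers (built via a nested range comprehension and scanned in a loop) with a product of two independent 1D band tests in_band(x) and in_band(y).
import Mathlib
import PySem

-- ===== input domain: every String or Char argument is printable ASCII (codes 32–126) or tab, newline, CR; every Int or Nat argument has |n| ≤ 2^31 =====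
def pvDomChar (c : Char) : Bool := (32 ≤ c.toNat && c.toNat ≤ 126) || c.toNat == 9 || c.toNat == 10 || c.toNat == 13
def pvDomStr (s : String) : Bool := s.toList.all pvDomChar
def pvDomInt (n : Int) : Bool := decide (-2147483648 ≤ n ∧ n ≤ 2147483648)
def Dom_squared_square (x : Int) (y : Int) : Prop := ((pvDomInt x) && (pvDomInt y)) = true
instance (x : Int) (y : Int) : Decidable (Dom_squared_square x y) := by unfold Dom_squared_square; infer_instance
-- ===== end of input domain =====

-- B replaces A's scan over the 9 small-square centers with two independent 1D band tests (objective: simpler).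

-- ===== PORT A =====
-- the for-loop over small_squares: return False on the first square containing the point, else True
def squaredSquareScan (x y : Int) : List (Int × Int) → Bool
  | [] => true
  | (xc, yc) :: rest =>
      if xc - PySem.Int.floordiv 100 2 ≤ x ∧ x ≤ xc + PySem.Int.floordiv 100 2 ∧
         yc - PySem.Int.floordiv 100 2 ≤ y ∧ y ≤ yc + PySem.Int.floordiv 100 2 then false
      else squaredSquareScan x y rest

def squared_square (x : Int) (y : Int) : Bool :=
  -- large-square guard
  if ¬ (100 ≤ x ∧ x ≤ 700 ∧ 100 ≤ y ∧ y ≤ 700) then false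
  else
    -- small_squares = nested comprehension over range(200, 601, 200)
    let centers := (PySem.List.pyRange 200 601 200).flatMap
      (fun xc => (PySem.List.pyRange 200 601 200).map (fun yc => (xc, yc)))
    squaredSquareScan x y centers

-- ===== PORT B =====
def inBand (v : Int) : Bool :=
  (150 ≤ v ∧ v ≤ 250) ∨ (350 ≤ v ∧ v ≤ 450) ∨ (550 ≤ v ∧ v ≤ 650)

def squared_square_alt (x : Int) (y : Int) : Bool :=
  if ¬ (100 ≤ x ∧ x ≤ 700 ∧ 100 ≤ y ∧ y ≤ 700) then false
  else ¬ (inBand x ∧ inBand y)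

-- ===== PRECONDITION & SPEC =====
def Spec_squared_square (x : Int) (y : Int) (out : Bool) : Prop := out = squared_square_alt x y
instance (x : Int) (y : Int) (out : Bool) : Decidable (Spec_squared_square x y out) := by unfold Spec_squared_square; infer_instance

-- ===== CLAIM (what is proved, stated in full; the proofs are below) =====
def Claim_equal_squared_square : Prop := ∀ (x : Int) (y : Int), Dom_squared_square x y → Spec_squared_square x y (squared_square x y)

-- ===== LEMMAS AND PROOFS =====

-- ===== VERDICT (by name: the statement is the Claim_ definition above) =====
theorem centers_eval :
    (PySem.List.pyRange 200 601 200).flatMap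
      (fun xc => (PySem.List.pyRange 200 601 200).map (fun yc => (xc, yc))) =
    [(200,200),(200,400),(200,600),(400,200),(400,400),(400,600),(600,200),(600,400),(600,600)] := by
  decide

theorem floordiv_100_2 : PySem.Int.floordiv 100 2 = 50 := by decide

theorem ite_false_then_eq_true {p : Prop} [Decidable p] {b : Bool} :
    ((if p then false else b) = true) ↔ (¬ p ∧ b = true) := by
  split <;> simp_all

theorem squared_square_spec : Claim_equal_squared_square := by
  intro x y _
  unfold Spec_squared_square squared_square squared_square_alt
  rw [centers_eval]
  rw [Bool.eq_iff_iff]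
  simp only [squaredSquareScan, floordiv_100_2, inBand, ite_false_then_eq_true,
    decide_eq_true_eq, and_true]
  constructor
  · rintro ⟨hg, h11, h12, h13, h21, h22, h23, h31, h32, h33⟩
    refine ⟨hg, ?_⟩
    rintro ⟨ha, hb⟩
    rcases ha with ha|ha|ha <;> rcases hb with hb|hb|hb <;>
      [exact h11 (by omega); exact h12 (by omega); exact h13 (by omega);
       exact h21 (by omega); exact h22 (by omega); exact h23 (by omega);
       exact h31 (by omega); exact h32 (by omega); exact h33 (by omega)]
  · rintro ⟨hg, h⟩
    refine ⟨hg, ?_, ?_, ?_, ?_, ?_, ?_, ?_, ?_, ?_⟩ <;> intro hc <;>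
      exact h ⟨by omega, by omega⟩
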